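-- pv_equiv track=rewrite | github.com/greywolf0324/security_manager | security/OMS_Data_engineering/util.py | orderer
-- ===== SOURCE A (Python) =====
-- from collections import OrderedDict
--
-- def orderer(input, fields, customer_name):
--     matching_res = []
--
--     for matching in input:
--         d = OrderedDict(matching)
--
--         # if customer_name == "MICHAELS":
--         #     for key in fields[:-1]:
--         #         d.move_to_end(key)
--         # else:
--         for key in fields:
--             d.move_to_end(key)
--
--         matching_res.append(d)
--
--     return matching_res
-- ===== SOURCE B (Python) =====
-- from collections import OrderedDict
--
-- def orderer(input, fields, customer_name):
--     moved = set(fields)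
--     result = []
--     for matching in input:
--         d = dict(matching)
--         new = OrderedDict((k, v) for k, v in d.items() if k not in moved)
--         for k in fields:
--             new[k] = d[k]
--         result.append(new)
--     return result
-- ===== Notes on version B (the rewrite author's own statement) =====
-- stated objective: simpler
-- what changed: Replaces the copy-then-move_to_end mutation loop by a direct partition-and-append construction (keep the non-moved entries, then insert each field with its value); Pre_ excludes inputs where some field is missing from a record (A raises KeyError there) and nonempty inputs with duplicate-field lists whose first-occurrence order of the distinct fields differs from their last-occurrence order, where A's move_to_end keeps the LAST occurrence's position while B's insertion keeps the first -- both orders are defensible on that unspecified corner.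
import Mathlib
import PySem

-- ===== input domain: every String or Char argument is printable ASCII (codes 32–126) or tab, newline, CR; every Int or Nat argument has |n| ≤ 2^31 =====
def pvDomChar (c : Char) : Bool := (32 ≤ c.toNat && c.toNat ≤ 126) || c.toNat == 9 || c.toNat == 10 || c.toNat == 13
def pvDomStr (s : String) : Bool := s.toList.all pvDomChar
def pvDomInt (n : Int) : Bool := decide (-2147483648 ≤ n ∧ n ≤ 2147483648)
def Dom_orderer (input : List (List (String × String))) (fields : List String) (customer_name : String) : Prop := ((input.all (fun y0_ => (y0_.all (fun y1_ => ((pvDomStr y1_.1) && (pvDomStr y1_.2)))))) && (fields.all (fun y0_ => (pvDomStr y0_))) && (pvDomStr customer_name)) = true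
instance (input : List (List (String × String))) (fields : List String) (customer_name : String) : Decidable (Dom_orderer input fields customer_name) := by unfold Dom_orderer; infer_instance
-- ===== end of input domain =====

-- B builds each output dict directly (the entries whose key is not a field, then each field
-- with its value) instead of A's copy-then-move_to_end mutation loop; objective: simpler.

-- ===== PORT A =====
-- d.move_to_end(key); Python raises KeyError when key is absent — those inputs are outside Pre_.
def pvMove (d : PySem.Dict String String) (k : String) : PySem.Dict String String :=
  match d.get? k with
  | some v => (d.erase k).insert k v
  | none => d

def orderer (input : List (List (String × String))) (fields : List String) (customer_name : String) : List (List (String × String)) :=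
  input.foldl (fun acc matching =>
    acc ++ [(fields.foldl pvMove (PySem.Dict.ofList matching)).items]) []

-- ===== PORT B =====
-- new[k] = d[k]; Python raises KeyError when k is absent from d — those inputs are outside Pre_.
def orderer_alt (input : List (List (String × String))) (fields : List String) (customer_name : String) : List (List (String × String)) :=
  let moved := PySem.Set.ofList fields
  input.foldl (fun acc matching =>
    let d := PySem.Dict.ofList matching
    let new := PySem.Dict.ofList (d.items.filter (fun p => !moved.contains p.1))
    acc ++ [(fields.foldl (fun nd k => nd.insert k (d.getD k "")) new).items]) []

-- ===== PRECONDITION & SPEC =====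
-- Pre_ excludes (a) inputs where some field is missing from some record — A's move_to_end
-- (and B's d[k]) raises KeyError there — and (b) duplicate-field lists whose first-occurrence
-- order of the distinct fields differs from their last-occurrence order: there A's move_to_end
-- keeps a duplicated field at its LAST occurrence's position while B's insertion keeps the
-- first — an unspecified corner on which either order is defensible (with no record at all
-- the field order is irrelevant, so empty inputs stay inside Pre_).
def Pre_orderer (input : List (List (String × String))) (fields : List String) (customer_name : String) : Prop :=
  (input = [] ∨ PySem.Set.ofList fields = (PySem.Set.ofList fields.reverse).reverse)
    ∧ ∀ m ∈ input, ∀ k ∈ fields, k ∈ m.map Prod.fst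
instance (input : List (List (String × String))) (fields : List String) (customer_name : String) : Decidable (Pre_orderer input fields customer_name) := by unfold Pre_orderer; infer_instance

def pvWitness_orderer : (List (List (String × String))) × List String × String :=
  ([[("a", "1"), ("b", "2"), ("c", "3")], [("b", "x"), ("a", "y"), ("c", "z")]], ["a", "b"], "ACME")

def Spec_orderer (input : List (List (String × String))) (fields : List String) (customer_name : String) (out : List (List (String × String))) : Prop := out = orderer_alt input fields customer_name
instance (input : List (List (String × String))) (fields : List String) (customer_name : String) (out : List (List (String × String))) : Decidable (Spec_orderer input fields customer_name out) := by unfold Spec_orderer; infer_instance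

-- ===== CLAIM (what is proved, stated in full; the proofs are below) =====
def Claim_equal_orderer : Prop := ∀ (input : List (List (String × String))) (fields : List String) (customer_name : String), Dom_orderer input fields customer_name → Pre_orderer input fields customer_name → Spec_orderer input fields customer_name (orderer input fields customer_name)

-- ===== LEMMAS AND PROOFS =====

-- erase keeps lookups at other keys
lemma pv_get?_erase_ne (d : PySem.Dict String String) (k k' : String) (h : k' ≠ k) :
    (d.erase k).get? k' = d.get? k' := by
  simp only [PySem.Dict.get?, PySem.Dict.erase, List.find?_filter]
  congr 2
  funext p
  by_cases hp : p.1 = k' <;> simp [hp, h]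

lemma pv_contains_erase (d : PySem.Dict String String) (k k' : String) (h : k' ≠ k) :
    (d.erase k).contains k' = d.contains k' := by
  simp only [PySem.Dict.contains, PySem.Dict.erase, List.any_filter]
  congr 1
  funext p
  by_cases hp : p.1 = k' <;> simp [hp, h]

-- membership in fields gives containment in the record's dict
lemma pv_contains_ofList (m : List (String × String)) (k : String) (h : k ∈ m.map Prod.fst) :
    (PySem.Dict.ofList m).contains k = true := by
  rw [PySem.Dict.contains_iff_mem_keys]
  have := PySem.Dict.keys_foldl_insert_key (ν := String) m Prod.fst (fun _ p => p.2) PySem.Dict.empty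
  simp only [PySem.Dict.ofList, PySem.Dict.update]
  rw [show (fun (acc : PySem.Dict String String) (p : String × String) => acc.insert p.1 p.2) = (fun d x => d.insert (Prod.fst x) ((fun _ p => p.2) d x)) from rfl, this]
  have : PySem.Set.update (PySem.Dict.empty (κ := String) (ν := String)).keys (m.map Prod.fst) = PySem.Set.ofList (m.map Prod.fst) := rfl
  rw [this]
  exact (PySem.Set.mem_ofList _ _).mpr h

-- a dict built from pairs with distinct keys has exactly those pairs as items
lemma pv_items_ofList (pairs : List (String × String)) (h : (pairs.map Prod.fst).Nodup) :
    (PySem.Dict.ofList pairs).items = pairs := by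
  have hfresh : ∀ p ∈ pairs, (PySem.Dict.empty (κ := String) (ν := String)).contains p.1 = false := by
    intro p _; simp [PySem.Dict.contains_empty]
  have := PySem.Dict.items_foldl_insert_fresh (d := PySem.Dict.empty)
    (l := pairs) (k := Prod.fst) (v := Prod.snd) hfresh h
  simpa [PySem.Dict.ofList, PySem.Dict.update] using this

-- A's per-record invariant: the move_to_end fold partitions the items
lemma pv_main (fields : List String) (d : PySem.Dict String String)
    (hnd : d.keys.Nodup) (hc : ∀ k ∈ fields, d.contains k = true) :
    (fields.foldl pvMove d).items =
      d.items.filter (fun p => !fields.contains p.1)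
        ++ (PySem.Set.ofList fields.reverse).reverse.map (fun k => (k, d.getD k "")) := by
  induction fields generalizing d with
  | nil => simp [PySem.Set.ofList, PySem.Set.empty]
  | cons k rest ih =>
    have hck : d.contains k = true := hc k (List.mem_cons_self)
    obtain ⟨v, hv⟩ : ∃ v, d.get? k = some v := by
      rw [PySem.Dict.contains_eq_isSome_get?] at hck
      exact Option.isSome_iff_exists.mp hck
    have hstep : pvMove d k = (d.erase k).insert k v := by simp [pvMove, hv]
    have hnc : (d.erase k).contains k = false := by
      simp only [PySem.Dict.contains, PySem.Dict.erase, List.any_filter]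
      apply List.any_eq_false.mpr
      intro p _
      by_cases hp : p.1 = k <;> simp [hp]
    have hd'items : ((d.erase k).insert k v).items = (d.erase k).items ++ [(k, v)] :=
      PySem.Dict.items_insert_of_not_contains _ _ hnc
    have hndE : (d.erase k).keys.Nodup := by
      have : (d.erase k).keys.Sublist d.keys := List.Sublist.map Prod.fst List.filter_sublist
      exact hnd.sublist this
    have hnd' : ((d.erase k).insert k v).keys.Nodup := PySem.Dict.nodup_keys_insert _ _ _ hndE
    have hc' : ∀ j ∈ rest, ((d.erase k).insert k v).contains j = true := by
      intro j hj
      rw [PySem.Dict.contains_insert]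
      by_cases hjk : j = k
      · simp [hjk]
      · rw [pv_contains_erase _ _ _ hjk]
        simp [hc j (List.mem_cons_of_mem _ hj)]
    have hgd : ∀ j, ((d.erase k).insert k v).getD j "" = d.getD j "" := by
      intro j
      by_cases hjk : j = k
      · subst hjk
        rw [PySem.Dict.getD_insert_self, PySem.Dict.getD_eq_get?_getD, hv]
        rfl
      · rw [PySem.Dict.getD_insert_of_ne _ _ _ hjk, PySem.Dict.getD_eq_get?_getD,
            pv_get?_erase_ne _ _ _ hjk, ← PySem.Dict.getD_eq_get?_getD]
    have hsetrev : (PySem.Set.ofList (k :: rest).reverse) =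
        PySem.Set.add (PySem.Set.ofList rest.reverse) k := by
      rw [List.reverse_cons, PySem.Set.ofList_eq_foldl, List.foldl_append,
          ← PySem.Set.ofList_eq_foldl]
      rfl
    have hmemset : k ∈ PySem.Set.ofList rest.reverse ↔ k ∈ rest := by
      rw [PySem.Set.mem_ofList, List.mem_reverse]
    rw [List.foldl_cons, hstep, ih _ hnd' hc']
    have htail : (PySem.Set.ofList rest.reverse).reverse.map
          (fun j => (j, ((d.erase k).insert k v).getD j ""))
        = (PySem.Set.ofList rest.reverse).reverse.map (fun j => (j, d.getD j "")) := by
      apply List.map_congr_left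
      intro j _
      rw [hgd j]
    rw [htail, hd'items, List.filter_append]
    have hfe : (d.erase k).items.filter (fun p => !rest.contains p.1)
        = d.items.filter (fun p => !(k :: rest).contains p.1) := by
      rw [show (d.erase k).items = d.items.filter (fun p => !(p.1 == k)) from rfl,
          List.filter_filter]
      apply List.filter_congr
      intro p _
      by_cases hp : p.1 = k <;> simp [hp]
    rw [hfe, hsetrev]
    by_cases hk : k ∈ rest
    · have : PySem.Set.add (PySem.Set.ofList rest.reverse) k = PySem.Set.ofList rest.reverse := by
        simp [PySem.Set.add, PySem.Set.contains, hmemset, hk]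
      rw [this]
      simp [hk]
    · have : PySem.Set.add (PySem.Set.ofList rest.reverse) k
          = PySem.Set.ofList rest.reverse ++ [k] := by
        simp [PySem.Set.add, PySem.Set.contains, hmemset, hk]
      rw [this]
      have hvd : d.getD k "" = v := by rw [PySem.Dict.getD_eq_get?_getD, hv]; rfl
      simp [hk, hvd]

-- B's insertion loop over fresh keys appends the distinct keys in first-occurrence order
-- (a repeated key overwrites the SAME value at the same position, so items are unchanged)
lemma pv_bmain (l : List String) (d new : PySem.Dict String String)
    (hfresh : ∀ k ∈ l, new.contains k = false) :
    (l.foldl (fun nd k => nd.insert k (d.getD k "")) new).items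
      = new.items ++ (PySem.Set.ofList l).map (fun k => (k, d.getD k "")) := by
  induction l using List.reverseRecOn with
  | nil => simp [PySem.Set.ofList]
  | append_singleton l' k ih =>
    rw [List.foldl_append, List.foldl_cons, List.foldl_nil]
    have hfresh' : ∀ j ∈ l', new.contains j = false := fun j hj => hfresh j (by simp [hj])
    have hfk : new.contains k = false := hfresh k (by simp)
    have hkeys : (l'.foldl (fun nd j => nd.insert j (d.getD j "")) new).keys
        = PySem.Set.update new.keys l' := by
      rw [show (fun (nd : PySem.Dict String String) (j : String) => nd.insert j (d.getD j ""))
            = (fun nd x => nd.insert x ((fun (_ : PySem.Dict String String) x => d.getD x "") nd x)) from rfl,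
          PySem.Dict.keys_foldl_insert]
    have hmemup : ∀ j, j ∈ PySem.Set.update new.keys l' ↔ j ∈ new.keys ∨ j ∈ l' := by
      intro j
      rw [PySem.Set.update_eq_append_filter]
      by_cases hj : j ∈ new.keys <;>
        simp [List.mem_filter, PySem.Set.mem_ofList, hj, PySem.Set.contains]
    have hknotnew : k ∉ new.keys := by
      intro hkmem
      rw [PySem.Dict.contains_eq_decide_mem_keys] at hfk
      simp [hkmem] at hfk
    by_cases hk : k ∈ l'
    · have hcont : (l'.foldl (fun nd j => nd.insert j (d.getD j "")) new).contains k = true := by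
        rw [PySem.Dict.contains_iff_mem_keys, hkeys]
        exact (hmemup k).mpr (Or.inr hk)
      rw [PySem.Dict.items_insert_of_contains _ _ hcont, ih hfresh']
      have hset : PySem.Set.ofList (l' ++ [k]) = PySem.Set.ofList l' := by
        rw [PySem.Set.ofList_append_singleton]
        simp [PySem.Set.add, PySem.Set.contains, PySem.Set.mem_ofList, hk]
      rw [hset, List.map_append]
      congr 1
      · have hid : ∀ p ∈ new.items, (if p.1 == k then (k, d.getD k "") else p) = p := by
          intro p hp
          have : p.1 ≠ k := by
            intro hpk
            exact hknotnew (by simpa [PySem.Dict.keys, hpk] using List.mem_map_of_mem (f := Prod.fst) hp)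
          simp [this]
        rw [List.map_congr_left hid]
        simp
      · rw [List.map_map]
        apply List.map_congr_left
        intro j _
        by_cases hjk : j = k <;> simp [Function.comp, hjk]
    · have hcont : (l'.foldl (fun nd j => nd.insert j (d.getD j "")) new).contains k = false := by
        rw [PySem.Dict.contains_eq_decide_mem_keys, hkeys, decide_eq_false_iff_not]
        intro hmem
        rcases (hmemup k).mp hmem with h | h
        · exact hknotnew h
        · exact hk h
      rw [PySem.Dict.items_insert_of_not_contains _ _ hcont, ih hfresh',
          PySem.Set.ofList_append_singleton]
      have hadd : PySem.Set.add (PySem.Set.ofList l') k = PySem.Set.ofList l' ++ [k] := by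
        simp [PySem.Set.add, PySem.Set.contains, PySem.Set.mem_ofList, hk]
      rw [hadd]
      simp [List.map_append]

-- ===== VERDICT (by name: the statement is the Claim_ definition above) =====
theorem orderer_spec : Claim_equal_orderer := by
  unfold Claim_equal_orderer
  intro input fields customer_name _ hpre
  obtain ⟨horder0, hpre⟩ := hpre
  unfold Spec_orderer orderer orderer_alt
  rw [PySem.List.foldl_append_singleton_eq_map, PySem.List.foldl_append_singleton_eq_map]
  simp only [List.nil_append]
  apply List.map_congr_left
  intro m hm
  have horder : PySem.Set.ofList fields = (PySem.Set.ofList fields.reverse).reverse := by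
    rcases horder0 with h | h
    · subst h; simp at hm
    · exact h
  set d := PySem.Dict.ofList m with hd
  have hdnd : d.keys.Nodup := PySem.Dict.nodup_keys_ofList m
  have hcont : ∀ k ∈ fields, d.contains k = true :=
    fun k hk => pv_contains_ofList m k (hpre m hm k hk)
  -- the two filters agree
  have hfilt : d.items.filter (fun p => !(PySem.Set.ofList fields).contains p.1)
      = d.items.filter (fun p => !fields.contains p.1) := by
    apply List.filter_congr
    intro p _
    by_cases hp : p.1 ∈ fields <;>
      simp [PySem.Set.contains_eq_listContains, PySem.Set.mem_ofList, hp]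
  have hfnd : ((d.items.filter (fun p => !fields.contains p.1)).map Prod.fst).Nodup := by
    have : (d.items.filter (fun p => !fields.contains p.1)).map Prod.fst |>.Sublist (d.items.map Prod.fst) :=
      List.Sublist.map Prod.fst List.filter_sublist
    exact hdnd.sublist this
  have hnewitems : (PySem.Dict.ofList (d.items.filter (fun p => !(PySem.Set.ofList fields).contains p.1))).items
      = d.items.filter (fun p => !fields.contains p.1) := by
    rw [hfilt]; exact pv_items_ofList _ hfnd
  have hfresh : ∀ k ∈ fields,
      (PySem.Dict.ofList (d.items.filter (fun p => !(PySem.Set.ofList fields).contains p.1))).contains k = false := by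
    intro k hk
    rw [PySem.Dict.contains_eq_decide_mem_keys]
    simp only [PySem.Dict.keys, hnewitems, decide_eq_false_iff_not]
    intro hmem
    obtain ⟨p, hp, hpk⟩ := List.mem_map.mp hmem
    have := (List.mem_filter.mp hp).2
    simp [hpk, hk] at this
  rw [pv_main fields d hdnd hcont, pv_bmain fields d _ hfresh, hnewitems]
  congr 1
  rw [horder]
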